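-- pv_equiv track=rewrite | github.com/mmconviva/viva-helios | helios_chat.py | _prepare_assignee_status_data
-- ===== SOURCE A (Python) =====
-- from typing import Dict, List, Optional, Any
--
-- def _prepare_assignee_status_data(jira_data: Dict[str, Any]) -> Dict[str, Dict[str, int]]:
--     """Prepare data for assignee vs status chart."""
--     all_issues = jira_data.get('epics', []) + jira_data.get('stories', []) + jira_data.get('tasks', [])
--
--     assignee_status = {}
--     for issue in all_issues:
--         assignee = issue.get('assignee', 'Unassigned')
--         status = issue.get('status', 'Unknown')
--
--         if assignee not in assignee_status:
--             assignee_status[assignee] = {}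
--         assignee_status[assignee][status] = assignee_status[assignee].get(status, 0) + 1
--
--     return assignee_status
-- ===== SOURCE B (Python) =====
-- def _prepare_assignee_status_data(jira_data):
--     """Prepare data for assignee vs status chart."""
--     all_issues = jira_data.get('epics', []) + jira_data.get('stories', []) + jira_data.get('tasks', [])
--
--     # pass 1: flatten to (assignee, status) pairs and count them in one flat table
--     counts = {}
--     for issue in all_issues:
--         pair = (issue.get('assignee', 'Unassigned'), issue.get('status', 'Unknown'))
--         counts[pair] = counts.get(pair, 0) + 1
--
--     # pass 2: restructure the flat table into the nested dict
--     result = {}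
--     for (assignee, status), n in counts.items():
--         result.setdefault(assignee, {})[status] = n
--     return result
-- ===== Notes on version B (the rewrite author's own statement) =====
-- stated objective: alternative
-- what changed: A builds the nested assignee->status->count dict incrementally while looping over issues; B first flattens the issues into (assignee, status) pairs counted in one flat tuple-keyed table, then restructures that table into the nested dict in a separate second pass.
import Mathlib
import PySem

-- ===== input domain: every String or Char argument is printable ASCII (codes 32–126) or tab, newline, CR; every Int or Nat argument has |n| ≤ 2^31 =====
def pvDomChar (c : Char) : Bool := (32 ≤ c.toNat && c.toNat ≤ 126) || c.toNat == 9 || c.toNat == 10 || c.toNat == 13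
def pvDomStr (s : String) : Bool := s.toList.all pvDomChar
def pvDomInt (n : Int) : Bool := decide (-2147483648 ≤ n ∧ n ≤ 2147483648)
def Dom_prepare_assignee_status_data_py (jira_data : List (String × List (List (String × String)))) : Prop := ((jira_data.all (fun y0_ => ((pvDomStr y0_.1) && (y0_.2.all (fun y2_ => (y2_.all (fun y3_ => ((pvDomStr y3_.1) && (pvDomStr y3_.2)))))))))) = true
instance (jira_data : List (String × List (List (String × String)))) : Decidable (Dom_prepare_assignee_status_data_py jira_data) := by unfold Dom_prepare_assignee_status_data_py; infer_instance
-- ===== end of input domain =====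

-- B replaces A's incremental nested-dict loop by a flat (assignee, status)-pair counting pass plus a
-- separate restructuring pass over the counter's items; same return value, different decomposition.

-- ===== PORT A =====
-- literal transliteration of _prepare_assignee_status_data (nested dict built issue by issue)
def prepare_assignee_status_data_py (jira_data : List (String × List (List (String × String)))) : List (String × List (String × Int)) :=
  let jd : PySem.Dict String (List (List (String × String))) := ⟨jira_data⟩
  let all_issues := (jd.getD "epics" []) ++ (jd.getD "stories" []) ++ (jd.getD "tasks" [])
  let assignee_status : PySem.Dict String (PySem.Dict String Int) :=
    all_issues.foldl (fun d issue =>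
      let assignee := (PySem.Dict.mk issue).getD "assignee" "Unassigned"
      let status := (PySem.Dict.mk issue).getD "status" "Unknown"
      -- if assignee not in assignee_status: assignee_status[assignee] = {}
      let d := if d.contains assignee then d else d.insert assignee PySem.Dict.empty
      -- assignee_status[assignee][status] = assignee_status[assignee].get(status, 0) + 1
      d.insert assignee ((d.getD assignee PySem.Dict.empty).insert status
        ((d.getD assignee PySem.Dict.empty).getD status 0 + 1)))
      PySem.Dict.empty
  assignee_status.items.map (fun p => (p.1, p.2.items))

-- ===== PORT B =====
-- literal transliteration of Source B: flat pair counter first, then restructure counter items into the nested dict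
def prepare_assignee_status_data_py_alt (jira_data : List (String × List (List (String × String)))) : List (String × List (String × Int)) :=
  let jd : PySem.Dict String (List (List (String × String))) := ⟨jira_data⟩
  let all_issues := (jd.getD "epics" []) ++ (jd.getD "stories" []) ++ (jd.getD "tasks" [])
  -- pass 1: counts[pair] = counts.get(pair, 0) + 1
  let counts : PySem.Dict (String × String) Int :=
    all_issues.foldl (fun c issue =>
      let pair := ((PySem.Dict.mk issue).getD "assignee" "Unassigned",
                   (PySem.Dict.mk issue).getD "status" "Unknown")
      c.insert pair (c.getD pair 0 + 1))
      PySem.Dict.empty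
  -- pass 2: result.setdefault(assignee, {})[status] = n
  let result : PySem.Dict String (PySem.Dict String Int) :=
    counts.items.foldl (fun r pn =>
      let r := r.setdefault pn.1.1 PySem.Dict.empty
      r.insert pn.1.1 ((r.getD pn.1.1 PySem.Dict.empty).insert pn.1.2 pn.2))
      PySem.Dict.empty
  result.items.map (fun p => (p.1, p.2.items))

-- ===== PRECONDITION & SPEC =====
def Spec_prepare_assignee_status_data_py (jira_data : List (String × List (List (String × String)))) (out : List (String × List (String × Int))) : Prop := out = prepare_assignee_status_data_py_alt jira_data
instance (jira_data : List (String × List (List (String × String)))) (out : List (String × List (String × Int))) : Decidable (Spec_prepare_assignee_status_data_py jira_data out) := by unfold Spec_prepare_assignee_status_data_py; infer_instance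

-- ===== CLAIM (what is proved, stated in full; the proofs are below) =====
def Claim_equal_prepare_assignee_status_data_py : Prop := ∀ (jira_data : List (String × List (List (String × String)))), Dom_prepare_assignee_status_data_py jira_data → Spec_prepare_assignee_status_data_py jira_data (prepare_assignee_status_data_py jira_data)

-- ===== LEMMAS AND PROOFS =====

-- the one nested-dict update both loops reduce to: d[a][s] = w (a and s inserted/overwritten in place)
def pvNStep (d : PySem.Dict String (PySem.Dict String Int)) (a s : String) (w : Int) :
    PySem.Dict String (PySem.Dict String Int) :=
  d.insert a ((d.getD a PySem.Dict.empty).insert s w)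

-- A's per-pair step (inner count incremented)
def pvStepA (d : PySem.Dict String (PySem.Dict String Int)) (p : String × String) :
    PySem.Dict String (PySem.Dict String Int) :=
  pvNStep d p.1 p.2 ((d.getD p.1 PySem.Dict.empty).getD p.2 0 + 1)

-- B's restructuring step (count written outright)
def pvStepB (r : PySem.Dict String (PySem.Dict String Int)) (pn : (String × String) × Int) :
    PySem.Dict String (PySem.Dict String Int) :=
  pvNStep r pn.1.1 pn.1.2 pn.2

def pvPair (issue : List (String × String)) : String × String :=
  ((PySem.Dict.mk issue).getD "assignee" "Unassigned", (PySem.Dict.mk issue).getD "status" "Unknown")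

-- insert at a PRESENT key commutes order-exactly with insert at any other key
theorem pv_ins_ins_comm {κ ν : Type} [BEq κ] [LawfulBEq κ] (d : PySem.Dict κ ν) (k k' : κ) (v w : ν)
    (h : d.contains k = true) (hne : k' ≠ k) :
    (d.insert k v).insert k' w = (d.insert k' w).insert k v := by
  apply PySem.Dict.ext
  by_cases h' : d.contains k' = true
  · simp [PySem.Dict.items_insert_of_contains, h, h', PySem.Dict.contains_insert, List.map_map]
    intro a b _
    by_cases hk : a = k <;> by_cases hk' : a = k' <;> simp_all
  · have h1 : (d.insert k v).contains k' = false := by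
      simp [PySem.Dict.contains_insert, h', hne]
    have h2 : (d.insert k' w).contains k = true := by
      simp [PySem.Dict.contains_insert, h]
    have h'f : d.contains k' = false := by simpa using h'
    simp [PySem.Dict.items_insert_of_contains, PySem.Dict.items_insert_of_not_contains, h, h', h1, h2,
      List.map_append]
    intro e; exact absurd e hne

-- setdefault followed by insert at the same key is just insert
theorem pv_setdefault_insert {κ ν : Type} [BEq κ] [LawfulBEq κ] (d : PySem.Dict κ ν) (k : κ) (e v : ν) :
    (d.setdefault k e).insert k v = d.insert k v := by
  by_cases h : d.contains k = true
  · rw [PySem.Dict.setdefault_of_contains d e h]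
  · rw [PySem.Dict.setdefault_of_not_contains d e (by simpa using h),
      PySem.Dict.insert_insert_self]

-- A's loop body IS pvStepA (the in-loop 'if assignee not in' collapses)
theorem pv_bodyA_eq (d : PySem.Dict String (PySem.Dict String Int)) (issue : List (String × String)) :
    (let assignee := (PySem.Dict.mk issue).getD "assignee" "Unassigned"
     let status := (PySem.Dict.mk issue).getD "status" "Unknown"
     let d' := if d.contains assignee then d else d.insert assignee PySem.Dict.empty
     d'.insert assignee ((d'.getD assignee PySem.Dict.empty).insert status
       ((d'.getD assignee PySem.Dict.empty).getD status 0 + 1)))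
    = pvStepA d (pvPair issue) := by
  simp only [pvStepA, pvNStep, pvPair]
  by_cases h : d.contains ((PySem.Dict.mk issue).getD "assignee" "Unassigned") = true
  · simp only [h, if_pos]
  · simp only [h, if_neg, Bool.not_eq_true]
    rw [PySem.Dict.getD_insert_self,
      PySem.Dict.getD_of_not_contains d _ (by simpa using h),
      PySem.Dict.insert_insert_self]

-- B's restructuring body IS pvStepB
theorem pv_bodyB_eq (r : PySem.Dict String (PySem.Dict String Int)) (pn : (String × String) × Int) :
    (let r' := r.setdefault pn.1.1 PySem.Dict.empty
     r'.insert pn.1.1 ((r'.getD pn.1.1 PySem.Dict.empty).insert pn.1.2 pn.2))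
    = pvStepB r pn := by
  simp only [pvStepB, pvNStep]
  rw [PySem.Dict.getD_setdefault_self, pv_setdefault_insert]

theorem pv_nstep_nstep_self (d : PySem.Dict String (PySem.Dict String Int)) (a s : String) (v w : Int) :
    pvNStep (pvNStep d a s v) a s w = pvNStep d a s w := by
  simp only [pvNStep, PySem.Dict.getD_insert_self, PySem.Dict.insert_insert_self]

theorem pv_contains_nstep (d : PySem.Dict String (PySem.Dict String Int)) (a s : String) (w : Int)
    (b : String) (h : d.contains b = true) : (pvNStep d a s w).contains b = true := by
  simp [pvNStep, PySem.Dict.contains_insert, h]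

theorem pv_inner_contains_nstep (d : PySem.Dict String (PySem.Dict String Int)) (a s : String) (w : Int)
    (b t : String) (h : ((d.getD b PySem.Dict.empty).contains t) = true) :
    (((pvNStep d a s w)).getD b PySem.Dict.empty).contains t = true := by
  by_cases hb : b = a
  · subst hb
    simp only [pvNStep, PySem.Dict.getD_insert_self]
    simp [PySem.Dict.contains_insert, h]
  · simp only [pvNStep]
    rw [PySem.Dict.getD_insert_of_ne _ _ _ hb]
    exact h

-- two nested updates at different (assignee, status) cells commute when the first cell already exists
theorem pv_nstep_comm (r : PySem.Dict String (PySem.Dict String Int)) (a s a' s' : String) (w m : Int)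
    (hq : ¬(a' = a ∧ s' = s)) (ha : r.contains a = true)
    (hs : (r.getD a PySem.Dict.empty).contains s = true) :
    pvNStep (pvNStep r a s w) a' s' m = pvNStep (pvNStep r a' s' m) a s w := by
  by_cases haa : a' = a
  · subst haa
    have hss : s' ≠ s := fun e => hq ⟨rfl, e⟩
    simp only [pvNStep, PySem.Dict.getD_insert_self, PySem.Dict.insert_insert_self]
    exact congrArg _ (pv_ins_ins_comm _ s s' w m hs hss)
  · simp only [pvNStep]
    rw [PySem.Dict.getD_insert_of_ne _ _ _ haa,
      PySem.Dict.getD_insert_of_ne _ _ _ (Ne.symm haa)]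
    exact pv_ins_ins_comm r a a' _ _ ha haa

-- a nested update at an existing cell floats out of the restructuring fold
theorem pv_comm_fold (rest : List ((String × String) × Int))
    (r : PySem.Dict String (PySem.Dict String Int)) (a s : String) (w : Int)
    (hrest : ∀ p ∈ rest, p.1 ≠ (a, s)) (ha : r.contains a = true)
    (hs : (r.getD a PySem.Dict.empty).contains s = true) :
    rest.foldl pvStepB (pvNStep r a s w) = pvNStep (rest.foldl pvStepB r) a s w := by
  induction rest generalizing r with
  | nil => rfl
  | cons q rest ih =>
    simp only [List.foldl_cons]
    have hq : ¬(q.1.1 = a ∧ q.1.2 = s) := by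
      intro ⟨e1, e2⟩
      exact hrest q (List.mem_cons_self) (by rw [← e1, ← e2])
    have hstep : pvStepB (pvNStep r a s w) q = pvNStep (pvStepB r q) a s w :=
      pv_nstep_comm r a s q.1.1 q.1.2 w q.2 hq ha hs
    rw [hstep]
    exact ih (pvStepB r q) (fun p hp => hrest p (List.mem_cons_of_mem _ hp))
      (pv_contains_nstep r q.1.1 q.1.2 q.2 a ha)
      (pv_inner_contains_nstep r q.1.1 q.1.2 q.2 a s hs)

-- bumping the (a,s) entry of the flat table in place = one nested update on the restructured dict
theorem pv_restr_bump (L : List ((String × String) × Int))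
    (r : PySem.Dict String (PySem.Dict String Int)) (a s : String) (w : Int)
    (hm : (a, s) ∈ L.map Prod.fst) (hnd : (L.map Prod.fst).Nodup) :
    (L.map (fun p => if p.1 == (a, s) then ((a, s), w) else p)).foldl pvStepB r
      = pvNStep (L.foldl pvStepB r) a s w := by
  induction L generalizing r with
  | nil => simp at hm
  | cons p rest ih =>
    simp only [List.map_cons, List.foldl_cons]
    by_cases hp : p.1 = (a, s)
    · have hnotin : (a, s) ∉ rest.map Prod.fst := by
        rw [List.map_cons, List.nodup_cons, hp] at hnd
        exact hnd.1
      have hrest : ∀ q ∈ rest, q.1 ≠ (a, s) := by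
        intro q hq e
        exact hnotin (e ▸ List.mem_map_of_mem hq)
      have hmap : rest.map (fun p => if p.1 == (a, s) then ((a, s), w) else p) = rest := by
        rw [List.map_congr_left (g := id) (fun q hq => by simp [hrest q hq]), List.map_id]
      rw [hmap]
      have hif : (if p.1 == (a, s) then ((a, s), w) else p) = ((a, s), w) := by simp [hp]
      rw [hif]
      have hr : pvStepB r ((a, s), w) = pvNStep (pvStepB r p) a s w := by
        have hp2 : pvStepB r p = pvNStep r a s p.2 := by
          simp only [pvStepB, hp]
        rw [hp2, pv_nstep_nstep_self]
        rfl
      rw [hr]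
      exact pv_comm_fold rest (pvStepB r p) a s w hrest
        (by simp [pvStepB, hp, pvNStep])
        (by simp [pvStepB, hp, pvNStep, PySem.Dict.getD_insert_self])
    · have hif : (if p.1 == (a, s) then ((a, s), w) else p) = p := by simp [hp]
      rw [hif]
      have hm' : (a, s) ∈ rest.map Prod.fst := by
        rcases (by simpa using hm : (a, s) = p.1 ∨ (a, s) ∈ rest.map Prod.fst) with e | h
        · exact absurd e.symm hp
        · exact h
      exact ih (pvStepB r p) hm' (by rw [List.map_cons, List.nodup_cons] at hnd; exact hnd.2)

-- the nested dict built by A's loop holds exact pair counts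
theorem pv_valA (ps : List (String × String)) (d : PySem.Dict String (PySem.Dict String Int))
    (a s : String) :
    (((ps.foldl pvStepA d).getD a PySem.Dict.empty).getD s 0)
      = ((d.getD a PySem.Dict.empty).getD s 0) + (ps.count (a, s) : Int) := by
  induction ps generalizing d with
  | nil => simp
  | cons p rest ih =>
    simp only [List.foldl_cons]
    rw [ih]
    have hcount : ((p :: rest).count (a, s) : Int)
        = (rest.count (a, s) : Int) + (if p = (a, s) then 1 else 0) := by
      rw [List.count_cons]
      by_cases h : p = (a, s) <;> simp [h]
    rw [hcount]
    by_cases h1 : a = p.1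
    · subst h1
      by_cases h2 : s = p.2
      · subst h2
        simp only [pvStepA, pvNStep, PySem.Dict.getD_insert_self]
        simp
        ring
      · simp only [pvStepA, pvNStep, PySem.Dict.getD_insert_self]
        rw [PySem.Dict.getD_insert_of_ne _ _ _ h2]
        have : ¬ p = (p.1, s) := fun e => h2 (by rw [e])
        simp [this]
    · simp only [pvStepA, pvNStep]
      rw [PySem.Dict.getD_insert_of_ne _ _ _ h1]
      have : ¬ p = (a, s) := fun e => h1 (by rw [e])
      simp [this]

-- MAIN: restructuring the pair counter = A's incremental nested-dict loop
theorem pv_main (ps : List (String × String)) :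
    ((PySem.Dict.counter ps).items).foldl pvStepB PySem.Dict.empty = ps.foldl pvStepA PySem.Dict.empty := by
  induction ps using List.reverseRecOn with
  | nil => rfl
  | append_singleton xs k ih =>
    obtain ⟨a, s⟩ := k
    rw [PySem.Dict.counter_append_singleton, List.foldl_append, List.foldl_cons, List.foldl_nil]
    simp only [PySem.Dict.modify]
    by_cases hc : (PySem.Dict.counter xs).contains (a, s) = true
    · rw [PySem.Dict.items_insert_of_contains _ _ hc]
      have hm : (a, s) ∈ (PySem.Dict.counter xs).items.map Prod.fst := by
        have := (PySem.Dict.contains_iff_mem_keys _ _).mp hc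
        simpa [PySem.Dict.keys] using this
      have hnd : ((PySem.Dict.counter xs).items.map Prod.fst).Nodup := by
        simpa [PySem.Dict.keys] using PySem.Dict.nodup_keys_counter xs
      rw [pv_restr_bump _ _ a s _ hm hnd, ih]
      simp only [pvStepA, pvNStep]
      rw [PySem.Dict.getD_counter, pv_valA xs PySem.Dict.empty a s]
      simp
    · have hcf : (PySem.Dict.counter xs).contains (a, s) = false := by simpa using hc
      rw [PySem.Dict.items_insert_of_not_contains _ _ hcf, List.foldl_append,
        List.foldl_cons, List.foldl_nil, ih]
      have hnot : (a, s) ∉ xs := by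
        intro hmem
        rw [PySem.Dict.contains_counter] at hcf
        simp at hcf
        exact hcf hmem
      have h0 : (PySem.Dict.counter xs).getD (a, s) 0 = 0 := by
        rw [PySem.Dict.getD_counter, List.count_eq_zero.mpr hnot]
        rfl
      have hv : (((xs.foldl pvStepA PySem.Dict.empty).getD a PySem.Dict.empty).getD s 0) = 0 := by
        rw [pv_valA xs PySem.Dict.empty a s, List.count_eq_zero.mpr hnot]
        simp
      simp only [pvStepB, pvStepA, pvNStep, h0, hv]

-- ===== VERDICT (by name: the statement is the Claim_ definition above) =====
theorem prepare_assignee_status_data_py_spec : Claim_equal_prepare_assignee_status_data_py := by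
  intro jira_data _
  unfold Spec_prepare_assignee_status_data_py prepare_assignee_status_data_py prepare_assignee_status_data_py_alt
  have hA : (fun (d : PySem.Dict String (PySem.Dict String Int)) (issue : List (String × String)) =>
      let assignee := (PySem.Dict.mk issue).getD "assignee" "Unassigned"
      let status := (PySem.Dict.mk issue).getD "status" "Unknown"
      let d := if d.contains assignee then d else d.insert assignee PySem.Dict.empty
      d.insert assignee ((d.getD assignee PySem.Dict.empty).insert status
        ((d.getD assignee PySem.Dict.empty).getD status 0 + 1)))
      = fun d issue => pvStepA d (pvPair issue) :=
    funext fun d => funext fun issue => pv_bodyA_eq d issue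
  have hC : (fun (c : PySem.Dict (String × String) Int) (issue : List (String × String)) =>
      let pair := ((PySem.Dict.mk issue).getD "assignee" "Unassigned",
                   (PySem.Dict.mk issue).getD "status" "Unknown")
      c.insert pair (c.getD pair 0 + 1))
      = fun c issue => c.insert (pvPair issue) (c.getD (pvPair issue) 0 + 1) := rfl
  have hB : (fun (r : PySem.Dict String (PySem.Dict String Int)) (pn : (String × String) × Int) =>
      let r := r.setdefault pn.1.1 PySem.Dict.empty
      r.insert pn.1.1 ((r.getD pn.1.1 PySem.Dict.empty).insert pn.1.2 pn.2))
      = pvStepB := funext fun r => funext fun pn => pv_bodyB_eq r pn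
  rw [hA, hC, hB]
  simp only []
  rw [← List.foldl_map (f := pvPair) (g := pvStepA),
    ← List.foldl_map (f := pvPair)
      (g := fun (c : PySem.Dict (String × String) Int) p => c.insert p (c.getD p 0 + 1)),
    PySem.Dict.foldl_insert_getD_add_one_eq_counter, pv_main]
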